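-- pv_equiv track=rewrite | github.com/mlesnews/lumina-oss | scripts/python/ai_overmind_analytics.py | _build_hierarchy
-- ===== SOURCE A (Python) =====
-- from typing import Dict, List, Optional
--
-- def _build_hierarchy(employees: List[Dict]) -> Dict:
--     """Build hierarchical org chart structure"""
--     hierarchy = {}
--
--     # Group by level
--     by_level = {}
--     for emp in employees:
--         level = emp["level"]
--         if level not in by_level:
--             by_level[level] = []
--         by_level[level].append(emp)
--
--     # Build top-down structure
--     for level in sorted(by_level.keys()):
--         hierarchy[f"level_{level}"] = by_level[level]
--
--     return hierarchy
-- ===== SOURCE B (Python) =====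
-- def _build_hierarchy(employees):
--     """Build hierarchical org chart structure"""
--     levels = sorted({emp["level"] for emp in employees})
--     return {
--         f"level_{level}": [emp for emp in employees if emp["level"] == level]
--         for level in levels
--     }
-- ===== Notes on version B (the rewrite author's own statement) =====
-- stated objective: simpler
-- what changed: Replaces A's two loops (dict bucketing pass plus a second loop over sorted keys) by sorting the set of levels once and building the result with a single dict comprehension that filters the employees per level.
import Mathlib
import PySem

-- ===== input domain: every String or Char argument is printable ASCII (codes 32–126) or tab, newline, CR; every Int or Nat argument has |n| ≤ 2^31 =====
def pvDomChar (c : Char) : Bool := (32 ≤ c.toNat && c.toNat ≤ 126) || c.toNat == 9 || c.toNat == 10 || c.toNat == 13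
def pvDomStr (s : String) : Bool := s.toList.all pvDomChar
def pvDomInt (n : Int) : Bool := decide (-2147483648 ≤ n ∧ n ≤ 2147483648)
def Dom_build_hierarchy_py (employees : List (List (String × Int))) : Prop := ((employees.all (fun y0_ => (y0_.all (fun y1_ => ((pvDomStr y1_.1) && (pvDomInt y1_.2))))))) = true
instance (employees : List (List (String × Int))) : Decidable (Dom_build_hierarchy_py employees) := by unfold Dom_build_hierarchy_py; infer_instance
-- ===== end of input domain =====

-- B replaces A's dict-bucketing loop + second loop over sorted keys by one sorted set of levels
-- and a per-level filter comprehension (objective: simpler; same results, not faster).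

-- emp["level"]: first-match association-list lookup; Python raises KeyError when the key is
-- missing — Pre_ excludes that, so the default 0 is never used on admitted inputs.
def pvLevel (e : List (String × Int)) : Int := (List.lookup "level" e).getD 0

-- ===== PORT A =====
def build_hierarchy_py (employees : List (List (String × Int))) : List (String × List (List (String × Int))) :=
  -- `if level not in by_level: by_level[level] = []` followed by `by_level[level].append(emp)`
  -- is exactly Dict.modify level [] (· ++ [emp])
  let by_level : PySem.Dict Int (List (List (String × Int))) :=
    employees.foldl (fun d emp => d.modify (pvLevel emp) [] (fun xs => xs ++ [emp])) PySem.Dict.empty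
  let hierarchy : PySem.Dict String (List (List (String × Int))) :=
    (PySem.List.sorted by_level.keys id).foldl
      (fun h level => h.insert ("level_" ++ PySem.Int.toStr level) (by_level.getD level []))
      PySem.Dict.empty
  hierarchy.items

-- ===== PORT B =====
def build_hierarchy_py_alt (employees : List (List (String × Int))) : List (String × List (List (String × Int))) :=
  let levels := PySem.List.sorted (PySem.Set.ofList (employees.map pvLevel)) id
  -- dict comprehension: the keys "level_<l>" for distinct sorted l are distinct, so it is this
  -- association list in insertion order
  levels.map (fun level =>
    ("level_" ++ PySem.Int.toStr level, employees.filter (fun emp => pvLevel emp == level)))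

-- ===== PRECONDITION & SPEC =====
-- Pre_ excludes only employees without a "level" key, on which Python A raises KeyError.
def Pre_build_hierarchy_py (employees : List (List (String × Int))) : Prop :=
  (employees.all (fun e => (List.lookup "level" e).isSome)) = true
instance (employees : List (List (String × Int))) : Decidable (Pre_build_hierarchy_py employees) := by unfold Pre_build_hierarchy_py; infer_instance
def pvWitness_build_hierarchy_py : (List (List (String × Int))) :=
  [[("level", 1), ("id", 7)], [("level", 0), ("id", 8)], [("level", 1), ("id", 9)]]

def Spec_build_hierarchy_py (employees : List (List (String × Int))) (out : List (String × List (List (String × Int)))) : Prop := out = build_hierarchy_py_alt employees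
instance (employees : List (List (String × Int))) (out : List (String × List (List (String × Int)))) : Decidable (Spec_build_hierarchy_py employees out) := by unfold Spec_build_hierarchy_py; infer_instance

-- ===== CLAIM (what is proved, stated in full; the proofs are below) =====
def Claim_equal_build_hierarchy_py : Prop := ∀ (employees : List (List (String × Int))), Dom_build_hierarchy_py employees → Pre_build_hierarchy_py employees → Spec_build_hierarchy_py employees (build_hierarchy_py employees)

-- ===== LEMMAS AND PROOFS =====

-- str(n) is injective: decimal digits of a Nat, their decoding, and sign separation.
def pvDigits (n : Nat) : List Char :=
  if h : n < 10 then [Nat.digitChar n]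
  else pvDigits (n / 10) ++ [Nat.digitChar (n % 10)]
decreasing_by exact Nat.div_lt_self (by omega) (by omega)

def pvDecode (ds : List Char) : Nat := ds.foldl (fun a c => a * 10 + (c.toNat - 48)) 0

theorem pvToDigitsCore_eq (f : Nat) : ∀ (n : Nat) (acc : List Char), n < f →
    Nat.toDigitsCore 10 f n acc = pvDigits n ++ acc := by
  induction f with
  | zero => intro n acc h; omega
  | succ f ih =>
    intro n acc h
    rw [Nat.toDigitsCore]
    by_cases h10 : n / 10 = 0
    · have hn : n < 10 := by omega
      simp [h10, pvDigits, hn, Nat.mod_eq_of_lt hn]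
    · have hge : ¬ n < 10 := by omega
      have hlt : n / 10 < f := by
        have h1 : n / 10 < n := Nat.div_lt_self (by omega) (by omega)
        omega
      simp only [h10, if_false]
      rw [ih (n / 10) _ hlt]
      conv_rhs => rw [pvDigits, dif_neg hge]
      simp

theorem pvToDigits_eq (n : Nat) : Nat.toDigits 10 n = pvDigits n := by
  rw [Nat.toDigits, pvToDigitsCore_eq (n + 1) n [] (by omega)]
  simp

theorem pvDigitChar_toNat (k : Nat) (h : k < 10) : (Nat.digitChar k).toNat - 48 = k := by
  interval_cases k <;> rfl

theorem pvDecode_pvDigits (n : Nat) : pvDecode (pvDigits n) = n := by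
  fun_induction pvDigits n with
  | case1 n h => simp [pvDecode, pvDigitChar_toNat n h]
  | case2 n h ih =>
    have hm : n % 10 < 10 := Nat.mod_lt _ (by omega)
    simp only [pvDecode, List.foldl_append, List.foldl_cons, List.foldl_nil] at *
    rw [ih, pvDigitChar_toNat _ hm]
    omega

theorem pvDigits_inj {m n : Nat} (h : pvDigits m = pvDigits n) : m = n := by
  have := congrArg pvDecode h
  rwa [pvDecode_pvDigits, pvDecode_pvDigits] at this

theorem pvDigits_no_minus (n : Nat) : ∀ c ∈ pvDigits n, c ≠ '-' := by
  fun_induction pvDigits n with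
  | case1 n h => intro c hc; simp at hc; subst hc; interval_cases n <;> decide
  | case2 n h ih =>
    intro c hc
    rcases List.mem_append.1 hc with hc | hc
    · exact ih c hc
    · simp at hc; subst hc
      have hm : n % 10 < 10 := Nat.mod_lt _ (by omega)
      have hmm := hm
      interval_cases hh : (n % 10) <;> simp_all <;> decide

theorem pvToChars_inj {m n : Int} (h : PySem.Int.toChars m = PySem.Int.toChars n) : m = n := by
  by_cases hm : m < 0 <;> by_cases hn : n < 0 <;>
    simp only [PySem.Int.toChars, hm, hn, if_true, if_false, pvToDigits_eq, List.cons.injEq,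
      true_and] at h
  · have := pvDigits_inj h; omega
  · exact absurd rfl (pvDigits_no_minus n.toNat '-' (h ▸ List.mem_cons_self ..))
  · exact absurd rfl (pvDigits_no_minus m.toNat '-' (h.symm ▸ List.mem_cons_self ..))
  · have := pvDigits_inj h; omega

theorem pvName_inj : Function.Injective (fun l : Int => "level_" ++ PySem.Int.toStr l) := by
  intro a b h
  have h' := congrArg String.toList h
  simp only [String.toList_append, PySem.Int.toList_toStr] at h'
  exact pvToChars_inj (List.append_cancel_left h')

-- the bucketing loop: its keys are the distinct levels in first-occurrence order,
-- and each bucket is the filter of the input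
theorem pvBuckets_keys (employees : List (List (String × Int))) :
    (employees.foldl (fun d emp => d.modify (pvLevel emp) [] (fun xs => xs ++ [emp]))
      (PySem.Dict.empty : PySem.Dict Int (List (List (String × Int))))).keys
      = PySem.Set.ofList (employees.map pvLevel) := by
  rw [PySem.Dict.keys_foldl_modify_key employees pvLevel [] (fun _ emp xs => xs ++ [emp])]
  rfl

theorem pvBuckets_getD (employees : List (List (String × Int))) (c : Int) :
    (employees.foldl (fun d emp => d.modify (pvLevel emp) [] (fun xs => xs ++ [emp]))
      (PySem.Dict.empty : PySem.Dict Int (List (List (String × Int))))).getD c []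
      = employees.filter (fun emp => pvLevel emp == c) := by
  have hmap : employees.foldl (fun d emp => d.modify (pvLevel emp) [] (fun xs => xs ++ [emp]))
      (PySem.Dict.empty : PySem.Dict Int (List (List (String × Int))))
      = (employees.map (fun emp => (pvLevel emp, emp))).foldl
          (fun d p => d.modify p.1 [] (fun xs => xs ++ [p.2])) PySem.Dict.empty := by
    rw [List.foldl_map]
  rw [hmap, PySem.Dict.getD_foldl_modify_append]
  simp [List.filter_map, Function.comp_def]

theorem pvBuckets_nodup (employees : List (List (String × Int))) :
    (employees.foldl (fun d emp => d.modify (pvLevel emp) [] (fun xs => xs ++ [emp]))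
      (PySem.Dict.empty : PySem.Dict Int (List (List (String × Int))))).keys.Nodup := by
  exact PySem.Dict.nodup_keys_foldl_modify_key employees pvLevel [] (fun _ emp xs => xs ++ [emp]) _
    (by simp [PySem.Dict.empty, PySem.Dict.keys])

-- ===== VERDICT (by name: the statement is the Claim_ definition above) =====
theorem build_hierarchy_py_spec : Claim_equal_build_hierarchy_py := by
  intro employees _ _
  unfold Spec_build_hierarchy_py build_hierarchy_py build_hierarchy_py_alt
  dsimp only
  rw [PySem.Dict.items_foldl_insert_fresh _ _ _ _ (fun a _ => rfl)
    (((PySem.List.sorted_perm _ id false).nodup_iff.mpr (pvBuckets_nodup employees)).map pvName_inj)]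
  rw [pvBuckets_keys]
  have hempty : (PySem.Dict.empty : PySem.Dict String (List (List (String × Int)))).items = [] := rfl
  rw [hempty, List.nil_append]
  exact List.map_congr_left (fun l _ => by rw [pvBuckets_getD])
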